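-- pv_equiv track=rewrite | github.com/therealharish/Problem-Solving | Hackerearth/Hackerrank/Construct the Array Non DP Approach.py | countArray
-- ===== SOURCE A (Python) =====
-- def countArray(n, k, x):
--   if(x!=1):
--     a = 0
--     b = 1
--   else:
--     a = 1
--     b = 0
--
--   mod = 10**9 + 7
--
--   for i in range(1, n):
--     temp = a
--     a = b%mod
--     b = ((temp+b)*(k-1) - a)%mod
--   return a%mod
-- ===== SOURCE B (Python) =====
-- def countArray(n, k, x):
--     # O(log n) via 2x2 matrix binary exponentiation of the linear recurrence mod 1e9+7
--     mod = 10**9 + 7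
--
--     def mul(A, B):
--         a, b, c, d = A
--         e, f, g, h = B
--         return ((a*e + b*g) % mod, (a*f + b*h) % mod,
--                 (c*e + d*g) % mod, (c*f + d*h) % mod)
--
--     a0, b0 = (1, 0) if x == 1 else (0, 1)
--     if n <= 1:
--         return a0
--     km1 = (k - 1) % mod
--     M = (0, 1, km1, (km1 - 1) % mod)
--     R = (1, 0, 0, 1)
--     e = n - 1
--     while e:
--         if e & 1:
--             R = mul(R, M)
--         M = mul(M, M)
--         e >>= 1
--     return (R[0]*a0 + R[1]*b0) % mod
-- ===== Notes on version B (the rewrite author's own statement) =====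
-- stated objective: faster
-- what changed: Replaces A's O(n) iteration of the linear recurrence with binary exponentiation of its 2x2 transition matrix mod 10^9+7.
import Mathlib
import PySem

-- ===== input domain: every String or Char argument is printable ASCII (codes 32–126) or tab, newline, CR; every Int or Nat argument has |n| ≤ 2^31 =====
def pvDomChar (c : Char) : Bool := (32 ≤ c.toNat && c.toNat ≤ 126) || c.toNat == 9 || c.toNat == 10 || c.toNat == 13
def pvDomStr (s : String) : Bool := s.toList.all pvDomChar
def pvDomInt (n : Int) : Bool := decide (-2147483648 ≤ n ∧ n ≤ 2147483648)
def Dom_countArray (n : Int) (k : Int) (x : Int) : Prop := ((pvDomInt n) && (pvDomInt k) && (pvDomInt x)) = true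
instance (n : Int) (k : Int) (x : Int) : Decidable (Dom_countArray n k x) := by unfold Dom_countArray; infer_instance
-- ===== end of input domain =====

-- B replaces A's O(n) linear-recurrence loop by 2x2 matrix binary exponentiation mod 10^9+7 (O(log n)).

-- ===== PORT A =====
def countArray (n : Int) (k : Int) (x : Int) : Int :=
  let ab : Int × Int := if x ≠ 1 then (0, 1) else (1, 0)
  let mod : Int := 10 ^ 9 + 7
  let ab2 := (PySem.List.pyRange 1 n 1).foldl
    (fun (st : Int × Int) _ =>
      let temp := st.1
      let a := PySem.Int.mod st.2 mod
      let b := PySem.Int.mod ((temp + st.2) * (k - 1) - a) mod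
      (a, b)) ab
  PySem.Int.mod ab2.1 mod

-- ===== PORT B =====
-- Source B's 'mul' helper (the closure variable 'mod' = 10^9+7 is a parameter here);
-- Python '%' with this positive modulus is exactly Lean '%' on Int.
def pvMul (m : Int) (A B : Int × Int × Int × Int) : Int × Int × Int × Int :=
  ((A.1 * B.1 + A.2.1 * B.2.2.1) % m, (A.1 * B.2.1 + A.2.1 * B.2.2.2) % m,
   (A.2.2.1 * B.1 + A.2.2.2 * B.2.2.1) % m, (A.2.2.1 * B.2.1 + A.2.2.2 * B.2.2.2) % m)

-- Source B's 'while e:' loop; e ≥ 1 at entry and 'e >>= 1' keeps it ≥ 0, so it is a Nat here.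
def pvLoop (m : Int) (R M : Int × Int × Int × Int) (e : Nat) : Int × Int × Int × Int :=
  if e = 0 then R
  else pvLoop m (if e % 2 = 1 then pvMul m R M else R) (pvMul m M M) (e / 2)
  decreasing_by exact Nat.div_lt_self (Nat.pos_of_ne_zero (by assumption)) one_lt_two

def countArray_alt (n : Int) (k : Int) (x : Int) : Int :=
  let mod : Int := 10 ^ 9 + 7
  let ab0 : Int × Int := if x = 1 then (1, 0) else (0, 1)
  if n ≤ 1 then ab0.1
  else
    let km1 := (k - 1) % mod
    let M : Int × Int × Int × Int := (0, 1, km1, (km1 - 1) % mod)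
    let R := pvLoop mod (1, 0, 0, 1) M (n - 1).toNat
    (R.1 * ab0.1 + R.2.1 * ab0.2) % mod

-- ===== PRECONDITION & SPEC =====
def Spec_countArray (n : Int) (k : Int) (x : Int) (out : Int) : Prop := out = countArray_alt n k x
instance (n : Int) (k : Int) (x : Int) (out : Int) : Decidable (Spec_countArray n k x out) := by unfold Spec_countArray; infer_instance

-- ===== CLAIM (what is proved, stated in full; the proofs are below) =====
def Claim_equal_countArray : Prop := ∀ (n : Int) (k : Int) (x : Int), Dom_countArray n k x → Spec_countArray n k x (countArray n k x)

-- ===== LEMMAS AND PROOFS =====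

-- the modulus
def pvP : Int := 1000000007

-- equality of residues via ZMod
theorem pvEmod {X Y : Int} (h : (X : ZMod 1000000007) = (Y : ZMod 1000000007)) :
    X % pvP = Y % pvP := by
  have := (ZMod.intCast_eq_intCast_iff' X Y 1000000007).mp h
  unfold pvP; exact_mod_cast this

theorem pvCastMod (a : Int) : ((a % pvP : Int) : ZMod 1000000007) = (a : ZMod 1000000007) := by
  unfold pvP; exact_mod_cast ZMod.intCast_mod a 1000000007

-- entrywise congruence mod pvP
def pvMEq (A B : Int × Int × Int × Int) : Prop :=
  A.1 % pvP = B.1 % pvP ∧ A.2.1 % pvP = B.2.1 % pvP ∧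
  A.2.2.1 % pvP = B.2.2.1 % pvP ∧ A.2.2.2 % pvP = B.2.2.2 % pvP

theorem pvMEq_refl (A : Int × Int × Int × Int) : pvMEq A A := ⟨rfl, rfl, rfl, rfl⟩

theorem pvMEq_symm {A B : Int × Int × Int × Int} (h : pvMEq A B) : pvMEq B A :=
  ⟨h.1.symm, h.2.1.symm, h.2.2.1.symm, h.2.2.2.symm⟩

theorem pvMEq_trans {A B C : Int × Int × Int × Int} (h1 : pvMEq A B) (h2 : pvMEq B C) : pvMEq A C :=
  ⟨h1.1.trans h2.1, h1.2.1.trans h2.2.1, h1.2.2.1.trans h2.2.2.1, h1.2.2.2.trans h2.2.2.2⟩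

-- cast a residue equality into ZMod
theorem pvZ {a b : Int} (h : a % pvP = b % pvP) : (a : ZMod 1000000007) = b := by
  rw [← pvCastMod a, ← pvCastMod b, h]

theorem pvMul_congr {A A' B B' : Int × Int × Int × Int} (hA : pvMEq A A') (hB : pvMEq B B') :
    pvMEq (pvMul pvP A B) (pvMul pvP A' B') := by
  obtain ⟨a1,a2,a3,a4⟩ := hA; obtain ⟨b1,b2,b3,b4⟩ := hB
  unfold pvMEq pvMul
  refine ⟨pvEmod ?_, pvEmod ?_, pvEmod ?_, pvEmod ?_⟩ <;>
    · push_cast [pvCastMod, pvZ a1, pvZ a2, pvZ a3, pvZ a4, pvZ b1, pvZ b2, pvZ b3, pvZ b4]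
      ring

theorem pvMul_assoc (A B C : Int × Int × Int × Int) :
    pvMEq (pvMul pvP (pvMul pvP A B) C) (pvMul pvP A (pvMul pvP B C)) := by
  unfold pvMEq pvMul
  refine ⟨pvEmod ?_, pvEmod ?_, pvEmod ?_, pvEmod ?_⟩ <;> · push_cast [pvCastMod]; ring

theorem pvMul_one_right (A : Int × Int × Int × Int) : pvMEq (pvMul pvP A (1,0,0,1)) A := by
  unfold pvMEq pvMul
  refine ⟨pvEmod ?_, pvEmod ?_, pvEmod ?_, pvEmod ?_⟩ <;> · push_cast [pvCastMod]; ring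

theorem pvMul_one_left (A : Int × Int × Int × Int) : pvMEq (pvMul pvP (1,0,0,1) A) A := by
  unfold pvMEq pvMul
  refine ⟨pvEmod ?_, pvEmod ?_, pvEmod ?_, pvEmod ?_⟩ <;> · push_cast [pvCastMod]; ring

-- naive left power: pvPow M m ~ M^m
def pvPow (M : Int × Int × Int × Int) : Nat → Int × Int × Int × Int
  | 0 => (1, 0, 0, 1)
  | m + 1 => pvMul pvP M (pvPow M m)

theorem pvPow_comm (M : Int × Int × Int × Int) (m : Nat) :
    pvMEq (pvMul pvP M (pvPow M m)) (pvMul pvP (pvPow M m) M) := by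
  induction m with
  | zero => exact pvMEq_trans (pvMul_one_right M) (pvMEq_symm (pvMul_one_left M))
  | succ m ih =>
    simp only [pvPow]
    exact pvMEq_symm (pvMEq_trans (pvMul_assoc M (pvPow M m) M)
      (pvMul_congr (pvMEq_refl M) (pvMEq_symm ih)))

theorem pvPow_double (M : Int × Int × Int × Int) (m : Nat) :
    pvMEq (pvPow (pvMul pvP M M) m) (pvPow M (2 * m)) := by
  induction m with
  | zero => exact pvMEq_refl _
  | succ m ih =>
    have h1 : pvMEq (pvPow (pvMul pvP M M) (m+1)) (pvMul pvP (pvMul pvP M M) (pvPow M (2*m))) :=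
      pvMul_congr (pvMEq_refl _) ih
    have h2 := pvMul_assoc M M (pvPow M (2*m))
    have he : 2 * (m + 1) = (2 * m + 1) + 1 := by ring
    rw [he]
    exact pvMEq_trans (pvMEq_trans h1 h2) (pvMEq_refl _)

-- the binary-exponentiation loop computes R * M^e (mod pvP)
theorem pvLoop_eq (R M : Int × Int × Int × Int) (e : Nat) :
    pvMEq (pvLoop pvP R M e) (pvMul pvP R (pvPow M e)) := by
  induction e using Nat.strong_induction_on generalizing R M with
  | _ e ih =>
    by_cases h : e = 0
    · subst h
      rw [pvLoop]
      exact pvMEq_symm (pvMul_one_right R)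
    · rw [pvLoop]
      simp only [if_neg h]
      have hlt : e / 2 < e := Nat.div_lt_self (Nat.pos_of_ne_zero h) one_lt_two
      have ihh := ih (e / 2) hlt (if e % 2 = 1 then pvMul pvP R M else R) (pvMul pvP M M)
      have hdd := pvPow_double M (e / 2)
      by_cases hp : e % 2 = 1
      · simp only [if_pos hp] at ihh ⊢
        have he : e = 2 * (e / 2) + 1 := by omega
        have step1 : pvMEq (pvMul pvP (pvMul pvP R M) (pvPow (pvMul pvP M M) (e/2)))
            (pvMul pvP (pvMul pvP R M) (pvPow M (2 * (e/2)))) := pvMul_congr (pvMEq_refl _) hdd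
        have step2 := pvMul_assoc R M (pvPow M (2 * (e/2)))
        have step3 : pvMEq (pvMul pvP R (pvMul pvP M (pvPow M (2 * (e/2)))))
            (pvMul pvP R (pvPow M (2 * (e/2) + 1))) := pvMEq_refl _
        have hall := pvMEq_trans (pvMEq_trans (pvMEq_trans ihh step1) step2) step3
        rw [← he] at hall; exact hall
      · simp only [if_neg hp] at ihh ⊢
        have he : e = 2 * (e / 2) := by omega
        have hall := pvMEq_trans ihh (pvMul_congr (pvMEq_refl R) hdd)
        rw [← he] at hall; exact hall

-- apply a matrix to a column vector, reducing mod pvP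
def pvApp (A : Int × Int × Int × Int) (v : Int × Int) : Int × Int :=
  ((A.1 * v.1 + A.2.1 * v.2) % pvP, (A.2.2.1 * v.1 + A.2.2.2 * v.2) % pvP)

theorem pvApp_congr {A B : Int × Int × Int × Int} (h : pvMEq A B) (v : Int × Int) :
    pvApp A v = pvApp B v := by
  obtain ⟨a1,a2,a3,a4⟩ := h
  unfold pvApp
  refine Prod.ext (pvEmod ?_) (pvEmod ?_) <;>
    · push_cast [pvCastMod, pvZ a1, pvZ a2, pvZ a3, pvZ a4]; ring

theorem pvApp_mul (A B : Int × Int × Int × Int) (v : Int × Int) :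
    pvApp (pvMul pvP A B) v = pvApp A (pvApp B v) := by
  unfold pvApp pvMul
  refine Prod.ext (pvEmod ?_) (pvEmod ?_) <;> · push_cast [pvCastMod]; ring

-- A's loop body as a function, with pvP in place of 10^9+7
def pvStep (k : Int) (st : Int × Int) : Int × Int :=
  (st.2 % pvP, ((st.1 + st.2) * (k - 1) - st.2 % pvP) % pvP)

def pvM (k : Int) : Int × Int × Int × Int :=
  (0, 1, (k - 1) % pvP, ((k - 1) % pvP - 1) % pvP)

theorem pvStep_eq_app (k : Int) (v : Int × Int) : pvStep k v = pvApp (pvM k) v := by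
  unfold pvStep pvApp pvM
  refine Prod.ext (pvEmod ?_) (pvEmod ?_) <;> · push_cast [pvCastMod]; ring

-- iterating A's step is applying the matrix power
theorem pvIter_eq (k : Int) (m : Nat) (v : Int × Int) :
    ((pvStep k)^[m] v).1 % pvP = (pvApp (pvPow (pvM k) m) v).1 := by
  induction m generalizing v with
  | zero =>
    simp only [Function.iterate_zero, id_eq, pvPow]
    exact pvEmod (by push_cast; ring)
  | succ m ih =>
    rw [Function.iterate_succ_apply, ih, pvStep_eq_app, ← pvApp_mul,
        pvApp_congr (pvMEq_symm (pvPow_comm (pvM k) m)) v]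
    rfl

-- a fold that ignores the list elements is function iteration
theorem pvFoldl_const {α β : Type} (F : α → α) (l : List β) (s : α) :
    l.foldl (fun st _ => F st) s = F^[l.length] s := by
  induction l generalizing s with
  | nil => rfl
  | cons h t ih => simp [List.foldl_cons, ih, Function.iterate_succ_apply]

-- the whole computation, for a fixed initial vector with 0/1 first component
theorem pvMain (n k : Int) (v0 : Int × Int) (h01 : v0.1 = 0 ∨ v0.1 = 1) :
    PySem.Int.mod ((PySem.List.pyRange 1 n 1).foldl
      (fun (st : Int × Int) (_ : Int) =>
        (PySem.Int.mod st.2 (10 ^ 9 + 7),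
         PySem.Int.mod ((st.1 + st.2) * (k - 1) - PySem.Int.mod st.2 (10 ^ 9 + 7)) (10 ^ 9 + 7))) v0).1
      (10 ^ 9 + 7)
    = (if n ≤ 1 then v0.1
       else ((pvLoop (10 ^ 9 + 7) (1,0,0,1)
                (0, 1, (k - 1) % (10 ^ 9 + 7), ((k - 1) % (10 ^ 9 + 7) - 1) % (10 ^ 9 + 7))
                (n - 1).toNat).1 * v0.1
             + (pvLoop (10 ^ 9 + 7) (1,0,0,1)
                (0, 1, (k - 1) % (10 ^ 9 + 7), ((k - 1) % (10 ^ 9 + 7) - 1) % (10 ^ 9 + 7))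
                (n - 1).toNat).2.1 * v0.2) % (10 ^ 9 + 7)) := by
  have hP : (10 ^ 9 + 7 : Int) = pvP := by unfold pvP; norm_num
  have hPpos : (0:Int) < 10 ^ 9 + 7 := by norm_num
  have hmod : ∀ a : Int, PySem.Int.mod a (10 ^ 9 + 7) = a % (10 ^ 9 + 7) := fun a =>
    PySem.Int.mod_eq_emod_of_pos hPpos
  have hfun : (fun (st : Int × Int) (_ : Int) =>
      (PySem.Int.mod st.2 (10 ^ 9 + 7),
       PySem.Int.mod ((st.1 + st.2) * (k - 1) - PySem.Int.mod st.2 (10 ^ 9 + 7)) (10 ^ 9 + 7)))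
      = fun (st : Int × Int) (_ : Int) => pvStep k st := by
    funext st y
    unfold pvStep
    simp only [hmod]
    simp only [hP]
  rw [hfun, pvFoldl_const (pvStep k) (PySem.List.pyRange 1 n 1) v0,
      PySem.List.length_pyRange_one, hmod, hP]
  by_cases hn : n ≤ 1
  · rw [if_pos hn]
    have h0 : (n - 1).toNat = 0 := by omega
    rw [h0]
    simp only [Function.iterate_zero, id_eq]
    rcases h01 with h | h <;> rw [h] <;> unfold pvP <;> decide
  · rw [if_neg hn, pvIter_eq]
    have hme : pvMEq (pvLoop pvP (1,0,0,1) (pvM k) (n - 1).toNat) (pvPow (pvM k) (n - 1).toNat) :=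
      pvMEq_trans (pvLoop_eq (1,0,0,1) (pvM k) (n - 1).toNat)
        (pvMul_one_left (pvPow (pvM k) (n - 1).toNat))
    have happ := pvApp_congr hme v0
    exact congrArg Prod.fst happ.symm

-- ===== VERDICT (by name: the statement is the Claim_ definition above) =====
theorem countArray_spec : Claim_equal_countArray := by
  intro n k x _
  unfold Spec_countArray countArray countArray_alt
  dsimp only
  by_cases hx : x = 1
  · rw [if_neg (by simp [hx] : ¬ x ≠ 1), if_pos hx]
    exact pvMain n k (1, 0) (Or.inr rfl)
  · rw [if_pos hx, if_neg hx]
    exact pvMain n k (0, 1) (Or.inl rfl)
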